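-- pv_equiv track=rewrite | github.com/stepraf/datacleanerv2 | tabs/ai_simplification.py | _batch_values
-- ===== SOURCE A (Python) =====
-- def _batch_values(values, batch_size=100):
--     """Split values into batches of specified size, ordered alphabetically.
--     Batches with less than 10 items are merged with the next batch if possible."""
--     sorted_values = sorted(values)
--     batches = []
--     for i in range(0, len(sorted_values), batch_size):
--         batches.append(sorted_values[i:i + batch_size])
--
--     # Merge small batches (< 10 items) with the next batch if they don't exceed batch_size
--     # Use a more aggressive merging strategy: keep merging small batches forward
--     merged_batches = []
--     i = 0
--     while i < len(batches):
--         current_batch = batches[i]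
--
--         # If current batch has less than 10 items, try to merge with following batches
--         if len(current_batch) < 10:
--             # Try to merge with next batches until we reach batch_size or run out of batches
--             merged_batch = current_batch.copy()
--             j = i + 1
--
--             while j < len(batches) and len(merged_batch) + len(batches[j]) <= batch_size:
--                 merged_batch.extend(batches[j])
--                 j += 1
--                 # Stop if we've merged enough (at least 10 items or reached a reasonable size)
--                 if len(merged_batch) >= 10:
--                     break
--
--             merged_batches.append(merged_batch)
--             i = j  # Skip all batches we merged
--         else:
--             # Batch is already >= 10 items, add as-is
--             merged_batches.append(current_batch)
--             i += 1
--
--     return merged_batches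
-- ===== SOURCE B (Python) =====
-- def _batch_values(values, batch_size=100):
--     """Alphabetically sorted values, streamed into batches of batch_size items."""
--     batches = []
--     current = []
--     for v in sorted(values):
--         current.append(v)
--         if len(current) >= batch_size:
--             batches.append(current)
--             current = []
--     if current:
--         batches.append(current)
--     return batches
-- ===== Notes on version B (the rewrite author's own statement) =====
-- stated objective: simpler
-- what changed: B replaces A's range/slice batching plus its dead merge pass (which can never merge anything, since every non-final slice already holds exactly batch_size items) with a single streaming pass that appends each sorted value to a current batch and flushes it when it reaches batch_size.
-- outside the precondition, e.g. on _batch_values(['a'], -2): A returns [], B returns [['a']]; on _batch_values(['a'], 0): A raises ValueError, B returns [['a']]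
import Mathlib
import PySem

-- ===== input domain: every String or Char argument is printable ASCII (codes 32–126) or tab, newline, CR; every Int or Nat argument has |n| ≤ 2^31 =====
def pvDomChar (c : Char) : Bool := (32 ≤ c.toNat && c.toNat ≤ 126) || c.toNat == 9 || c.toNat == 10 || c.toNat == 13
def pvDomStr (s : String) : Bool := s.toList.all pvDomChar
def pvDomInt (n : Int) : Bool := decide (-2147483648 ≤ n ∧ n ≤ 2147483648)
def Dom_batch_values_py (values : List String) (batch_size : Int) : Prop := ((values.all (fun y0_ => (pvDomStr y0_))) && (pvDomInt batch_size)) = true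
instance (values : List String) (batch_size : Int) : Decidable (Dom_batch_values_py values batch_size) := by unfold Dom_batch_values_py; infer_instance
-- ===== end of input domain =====

-- B drops A's merge pass (which is a no-op for every positive batch_size) and streams the
-- sorted values into batches in one accumulation pass: objective 'simpler'.

-- ===== PORT A =====
-- 'for i in range(0, len(sorted_values), batch_size): batches.append(sorted_values[i:i+batch_size])'
def pvBuildBatches (s : List String) (bs : Int) : List (List String) :=
  (PySem.List.pyRange 0 (s.length : Int) bs).foldl
    (fun acc i => acc ++ [PySem.List.slice s (some i) (some (i + bs))]) []

-- inner 'while j < len(batches) and len(merged_batch) + len(batches[j]) <= batch_size: …'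
-- fuel = number of remaining indices (len(batches) - j at entry), enough for every iteration
def pvMergeInner (batches : List (List String)) (bs : Int) :
    Nat → List String → Nat → (List String × Nat)
  | 0, merged, j => (merged, j)
  | fuel + 1, merged, j =>
    if j < batches.length ∧ ((merged.length : Int) + ((batches[j]?.getD []).length : Int) ≤ bs) then
      let merged' := merged ++ (batches[j]?.getD [])
      let j' := j + 1
      if 10 ≤ merged'.length then (merged', j')
      else pvMergeInner batches bs fuel merged' j'
    else (merged, j)

-- outer 'while i < len(batches): …' ; fuel = len(batches) (i increases by at least 1 per turn)
def pvMergeLoop (batches : List (List String)) (bs : Int) :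
    Nat → Nat → List (List String) → List (List String)
  | 0, _, acc => acc.reverse
  | fuel + 1, i, acc =>
    if i < batches.length then
      let current := batches[i]?.getD []
      if current.length < 10 then
        let r := pvMergeInner batches bs (batches.length - (i + 1)) current (i + 1)
        pvMergeLoop batches bs fuel r.2 (r.1 :: acc)
      else
        pvMergeLoop batches bs fuel (i + 1) (current :: acc)
    else acc.reverse

def batch_values_py (values : List String) (batch_size : Int) : List (List String) :=
  let sorted_values := PySem.List.sorted values (fun x => x) false
  let batches := pvBuildBatches sorted_values batch_size
  pvMergeLoop batches batch_size batches.length 0 []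

-- ===== PORT B =====
def batch_values_py_alt (values : List String) (batch_size : Int) : List (List String) :=
  let st :=
    (PySem.List.sorted values (fun x => x) false).foldl
      (fun (st : List (List String) × List String) v =>
        let current := st.2 ++ [v]
        if batch_size ≤ (current.length : Int) then (st.1 ++ [current], []) else (st.1, current))
      ([], [])
  if st.2 ≠ [] then st.1 ++ [st.2] else st.1

-- ===== PRECONDITION & SPEC =====
-- Pre_ excludes non-positive batch_size, outside the function's natural domain: A raises
-- ValueError at batch_size zero, and for a negative batch_size the result is unspecified
-- (A's empty range drops every value while B emits singleton batches — see the cites in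
-- claim.json); on the natural domain of positive batch sizes both are total and equal.
def Pre_batch_values_py (values : List String) (batch_size : Int) : Prop := 0 < batch_size
instance (values : List String) (batch_size : Int) : Decidable (Pre_batch_values_py values batch_size) := by unfold Pre_batch_values_py; infer_instance

def pvWitness_batch_values_py : List String × Int := (["pear", "apple", "fig"], 2)

def Spec_batch_values_py (values : List String) (batch_size : Int) (out : List (List String)) : Prop := out = batch_values_py_alt values batch_size
instance (values : List String) (batch_size : Int) (out : List (List String)) : Decidable (Spec_batch_values_py values batch_size out) := by unfold Spec_batch_values_py; infer_instance

-- ===== CLAIM (what is proved, stated in full; the proofs are below) =====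
def Claim_equal_batch_values_py : Prop := ∀ (values : List String) (batch_size : Int), Dom_batch_values_py values batch_size → Pre_batch_values_py values batch_size → Spec_batch_values_py values batch_size (batch_values_py values batch_size)

-- ===== LEMMAS AND PROOFS =====

-- canonical chunking: successive blocks of m+1 elements
def pvChunks (m : Nat) : List String → List (List String)
  | [] => []
  | x :: xs => ((x :: xs).take (m + 1)) :: pvChunks m ((x :: xs).drop (m + 1))
termination_by s => s.length
decreasing_by simp

theorem pvChunks_ne_nil (m : Nat) (s : List String) (hs : s ≠ []) :
    pvChunks m s = s.take (m + 1) :: pvChunks m (s.drop (m + 1)) := by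
  match s, hs with
  | x :: xs, _ => rw [pvChunks]

-- A-side: the slicing fold produces exactly the chunks
-- range(a, b, step) with positive step, as a cons
theorem pvRange_pos_cons (a b s : Int) (hs : 0 < s) (hab : a < b) :
    PySem.List.pyRange a b s = a :: PySem.List.pyRange (a + s) b s := by
  rw [PySem.List.pyRange_of_pos a b hs, PySem.List.pyRange_of_pos (a + s) b hs]
  rw [if_pos hab]
  have hdiv : (b - a + s - 1) / s = (b - (a + s) + s - 1) / s + 1 := by
    have h1 : b - a + s - 1 = (b - (a + s) + s - 1) + 1 * s := by ring
    rw [h1, Int.add_mul_ediv_right _ _ (by omega : s ≠ 0)]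
  by_cases h2 : a + s < b
  · rw [if_pos h2, hdiv]
    have hnn : 0 ≤ (b - (a + s) + s - 1) / s := Int.ediv_nonneg (by omega) (by omega)
    rw [show ((b - (a + s) + s - 1) / s + 1).toNat = ((b - (a + s) + s - 1) / s).toNat + 1 by omega]
    rw [List.range_succ_eq_map]
    simp only [List.map_cons, List.map_map]
    congr 1
    · simp
    · apply List.map_congr_left
      intro k _
      simp only [Function.comp_apply]
      push_cast
      ring
  · rw [if_neg h2, hdiv]
    have hz : (b - (a + s) + s - 1) / s = 0 := by
      apply Int.ediv_eq_zero_of_lt <;> omega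
    rw [hz]
    simp

theorem pvRange_pos_nil (a b s : Int) (hs : 0 < s) (hab : b ≤ a) :
    PySem.List.pyRange a b s = [] := by
  rw [PySem.List.pyRange_of_pos a b hs, if_neg (by omega)]
  simp

theorem pvFold_slices_aux (bs : Int) (hbs : 0 < bs) (s : List String) :
    ∀ (k : Nat) (a : Int), 0 ≤ a → s.length - a.toNat ≤ k →
      ∀ acc : List (List String),
        (PySem.List.pyRange a (s.length : Int) bs).foldl
          (fun out i => out ++ [PySem.List.slice s (some i) (some (i + bs))]) acc
        = acc ++ pvChunks (bs.toNat - 1) (s.drop a.toNat) := by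
  intro k
  induction k with
  | zero =>
    intro a ha hk acc
    have hlen : s.length ≤ a.toNat := by omega
    rw [pvRange_pos_nil a s.length bs hbs (by omega)]
    rw [List.drop_eq_nil_of_le hlen]
    simp [pvChunks]
  | succ k ih =>
    intro a ha hk acc
    by_cases h : a < (s.length : Int)
    · rw [pvRange_pos_cons a s.length bs hbs h]
      rw [List.foldl_cons]
      have hslice : PySem.List.slice s (some a) (some (a + bs))
          = (s.drop a.toNat).take bs.toNat := by
        rw [PySem.List.slice_toNat s ha (by omega)]
        congr 1
        omega
      rw [ih (a + bs) (by omega) (by omega)]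
      have hanat : a.toNat < s.length := by omega
      have hdrop : s.drop (a + bs).toNat = (s.drop a.toNat).drop bs.toNat := by
        rw [List.drop_drop]
        congr 1
        omega
      have hne : s.drop a.toNat ≠ [] := by
        intro hnil
        have := List.length_drop (l := s) (i := a.toNat)
        rw [hnil] at this
        simp at this
        omega
      rw [hdrop, pvChunks_ne_nil _ _ hne]
      rw [Nat.sub_add_cancel (by omega : 1 ≤ bs.toNat)]
      rw [hslice]
      simp [List.append_assoc]
    · rw [pvRange_pos_nil a s.length bs hbs (by omega)]
      rw [List.drop_eq_nil_of_le (by omega)]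
      simp [pvChunks]

theorem pvFold_slices (bs : Int) (hbs : 0 < bs) :
    ∀ (s : List String) (a : Int), 0 ≤ a →
      ∀ acc : List (List String),
        (PySem.List.pyRange a (s.length : Int) bs).foldl
          (fun out i => out ++ [PySem.List.slice s (some i) (some (i + bs))]) acc
        = acc ++ pvChunks (bs.toNat - 1) (s.drop a.toNat) := by
  intro s a ha acc
  exact pvFold_slices_aux bs hbs s (s.length - a.toNat) a ha le_rfl acc

theorem pvBuild_eq_chunks (s : List String) (bs : Int) (hbs : 0 < bs) :
    pvBuildBatches s bs = pvChunks (bs.toNat - 1) s := by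
  have h := pvFold_slices bs hbs s 0 le_rfl []
  simpa [pvBuildBatches] using h

-- goodness of a batch list: every non-last batch has exactly n items, the last is nonempty
def pvGood (n : Nat) : List (List String) → Prop
  | [] => True
  | [b] => b ≠ []
  | b :: c :: t => b.length = n ∧ pvGood n (c :: t)

theorem pvChunks_good_aux (m : Nat) : ∀ (k : Nat) (s : List String), s.length ≤ k →
    pvGood (m + 1) (pvChunks m s) := by
  intro k
  induction k with
  | zero =>
    intro s hs
    have : s = [] := List.eq_nil_of_length_eq_zero (by omega)
    subst this
    simp [pvChunks, pvGood]
  | succ k ih =>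
    intro s hs
    rcases s with _ | ⟨x, xs⟩
    · simp [pvChunks, pvGood]
    · rw [pvChunks_ne_nil m _ (by simp)]
      by_cases hd : (x :: xs).drop (m + 1) = []
      · rw [hd]
        simp [pvChunks, pvGood]
      · have htail := ih ((x :: xs).drop (m + 1)) (by simp only [List.length_drop, List.length_cons] at hs ⊢; omega)
        rw [pvChunks_ne_nil m _ hd] at htail ⊢
        refine ⟨?_, htail⟩
        have hlen : m + 1 < (x :: xs).length := by
          by_contra hle
          exact hd (List.drop_eq_nil_of_le (by omega))
        simp only [List.length_take, List.length_cons] at hlen ⊢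
        omega

theorem pvChunks_good (m : Nat) : ∀ s : List String, pvGood (m + 1) (pvChunks m s) := by
  intro s
  exact pvChunks_good_aux m s.length s le_rfl

theorem pvGood_getD_len (n : Nat) : ∀ (bl : List (List String)) (i : Nat),
    pvGood n bl → i + 1 < bl.length → (bl[i]?.getD []).length = n := by
  intro bl
  induction bl with
  | nil => intro i _ hi; simp at hi
  | cons b t ih =>
    intro i hg hi
    rcases t with _ | ⟨c, t'⟩
    · simp at hi
    · rcases hg with ⟨hb, hg'⟩
      rcases i with _ | i
      · simpa using hb
      · simp only [List.getElem?_cons_succ]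
        exact ih i hg' (by simp at hi ⊢; omega)

theorem pvGood_getD_ne (n : Nat) : ∀ (bl : List (List String)) (i : Nat),
    pvGood n bl → 0 < n → i < bl.length → bl[i]?.getD [] ≠ [] := by
  intro bl
  induction bl with
  | nil => intro i _ _ hi; simp at hi
  | cons b t ih =>
    intro i hg hn hi
    rcases t with _ | ⟨c, t'⟩
    · rcases i with _ | i
      · simpa using hg
      · simp at hi
    · rcases hg with ⟨hb, hg'⟩
      rcases i with _ | i
      · simp only [List.getElem?_cons_zero, Option.getD_some]
        intro hnil
        rw [hnil] at hb
        simp at hb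
        omega
      · simp only [List.getElem?_cons_succ]
        exact ih i hg' hn (by simp at hi ⊢; omega)

-- inner merge loop never merges anything on a good batch list
theorem pvInner_id (bl : List (List String)) (bs : Int) (hbs : 0 < bs)
    (hg : pvGood bs.toNat bl) (i : Nat) (hi : i < bl.length) (fuel : Nat) :
    pvMergeInner bl bs fuel (bl[i]?.getD []) (i + 1) = (bl[i]?.getD [], i + 1) := by
  cases fuel with
  | zero => rfl
  | succ fuel =>
    rw [pvMergeInner]
    rw [if_neg]
    rintro ⟨hj, hle⟩
    have h1 : (bl[i]?.getD []).length = bs.toNat := pvGood_getD_len bs.toNat bl i hg hj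
    have h2 : bl[i + 1]?.getD [] ≠ [] := pvGood_getD_ne bs.toNat bl (i + 1) hg (by omega) hj
    have h3 : 0 < (bl[i + 1]?.getD []).length := List.length_pos_iff.mpr h2
    rw [h1] at hle
    omega

-- hence the outer merge loop is the identity
theorem pvOuter_id (bl : List (List String)) (bs : Int) (hbs : 0 < bs)
    (hg : pvGood bs.toNat bl) :
    ∀ (fuel i : Nat) (acc : List (List String)), bl.length - i ≤ fuel →
      pvMergeLoop bl bs fuel i acc = acc.reverse ++ bl.drop i := by
  intro fuel
  induction fuel with
  | zero =>
    intro i acc hle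
    rw [List.drop_eq_nil_of_le (by omega)]
    simp [pvMergeLoop]
  | succ fuel ih =>
    intro i acc hle
    by_cases hi : i < bl.length
    · have hdrop : bl.drop i = (bl[i]?.getD []) :: bl.drop (i + 1) := by
        rw [List.drop_eq_getElem_cons hi]
        simp [List.getElem?_eq_getElem hi]
      rw [pvMergeLoop, if_pos hi]
      by_cases hlt : (bl[i]?.getD []).length < 10
      · rw [if_pos hlt]
        rw [pvInner_id bl bs hbs hg i hi]
        rw [ih (i + 1) _ (by omega)]
        rw [hdrop]
        simp
      · rw [if_neg hlt]
        rw [ih (i + 1) _ (by omega)]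
        rw [hdrop]
        simp
    · rw [pvMergeLoop, if_neg hi]
      rw [List.drop_eq_nil_of_le (by omega)]
      simp

-- B-side: the streaming fold, restated structurally
def pvStream (bs : Int) (cur : List String) : List String → List (List String)
  | [] => if cur = [] then [] else [cur]
  | v :: vs =>
    let c := cur ++ [v]
    if bs ≤ (c.length : Int) then c :: pvStream bs [] vs else pvStream bs c vs

theorem pvFoldB (bs : Int) : ∀ (s cur : List String) (acc : List (List String)),
    (fun st : List (List String) × List String => if st.2 ≠ [] then st.1 ++ [st.2] else st.1)
      (s.foldl
        (fun (st : List (List String) × List String) v =>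
          let current := st.2 ++ [v]
          if bs ≤ (current.length : Int) then (st.1 ++ [current], []) else (st.1, current))
        (acc, cur))
    = acc ++ pvStream bs cur s := by
  intro s
  induction s with
  | nil =>
    intro cur acc
    simp only [List.foldl_nil, pvStream]
    by_cases hc : cur = []
    · subst hc; simp
    · simp [hc]
  | cons v vs ih =>
    intro cur acc
    simp only [List.foldl_cons]
    simp only [pvStream]
    by_cases h : bs ≤ ((cur ++ [v]).length : Int)
    · rw [if_pos h, if_pos h]
      refine (ih [] (acc ++ [cur ++ [v]])).trans ?_
      simp
    · rw [if_neg h, if_neg h]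
      exact ih (cur ++ [v]) acc

theorem pvStream_eq_chunks (bs : Int) (hbs : 0 < bs) :
    ∀ (s cur : List String), cur.length < bs.toNat →
      pvStream bs cur s = pvChunks (bs.toNat - 1) (cur ++ s) := by
  intro s
  induction s with
  | nil =>
    intro cur hcur
    simp only [pvStream, List.append_nil]
    by_cases hc : cur = []
    · subst hc; simp [pvChunks]
    · rw [if_neg hc, pvChunks_ne_nil _ _ hc]
      rw [Nat.sub_add_cancel (by omega : 1 ≤ bs.toNat)]
      rw [List.take_of_length_le (by omega), List.drop_eq_nil_of_le (by omega)]
      simp [pvChunks]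
  | cons v vs ih =>
    intro cur hcur
    simp only [pvStream]
    have hlen : (cur ++ [v]).length = cur.length + 1 := by simp
    by_cases h : bs ≤ ((cur ++ [v]).length : Int)
    · rw [if_pos h]
      rw [hlen] at h
      have hfull : (cur ++ [v]).length = bs.toNat := by rw [hlen]; omega
      have hvs : pvStream bs [] vs = pvChunks (bs.toNat - 1) vs := by
        simpa using ih [] (by simp only [List.length_nil]; omega)
      rw [hvs]
      rw [show cur ++ v :: vs = (cur ++ [v]) ++ vs by simp]
      rw [pvChunks_ne_nil _ ((cur ++ [v]) ++ vs) (by simp)]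
      rw [Nat.sub_add_cancel (by omega : 1 ≤ bs.toNat)]
      rw [← hfull]
      rw [List.take_left' rfl, List.drop_left' rfl]
    · rw [if_neg h]
      rw [hlen] at h
      rw [ih (cur ++ [v]) (by omega)]
      congr 1
      simp

-- ===== VERDICT (by name: the statement is the Claim_ definition above) =====
theorem batch_values_py_spec : Claim_equal_batch_values_py := by
  intro values bs _ hpre
  replace hpre : 0 < bs := hpre
  unfold Spec_batch_values_py
  have hn : 0 < bs.toNat := by omega
  set s := PySem.List.sorted values (fun x => x) false with hs
  have hA : batch_values_py values bs = pvChunks (bs.toNat - 1) s := by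
    show pvMergeLoop (pvBuildBatches s bs) bs (pvBuildBatches s bs).length 0 []
        = pvChunks (bs.toNat - 1) s
    rw [pvBuild_eq_chunks s bs hpre]
    have hg : pvGood bs.toNat (pvChunks (bs.toNat - 1) s) := by
      have := pvChunks_good (bs.toNat - 1) s
      rwa [Nat.sub_add_cancel hn] at this
    rw [pvOuter_id _ bs hpre hg _ 0 [] (by omega)]
    simp
  have hB : batch_values_py_alt values bs = pvChunks (bs.toNat - 1) s := by
    show (fun st : List (List String) × List String => if st.2 ≠ [] then st.1 ++ [st.2] else st.1)
        (s.foldl _ ([], [])) = pvChunks (bs.toNat - 1) s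
    rw [pvFoldB bs s [] []]
    rw [pvStream_eq_chunks bs hpre s [] (by simpa using hn)]
    simp
  rw [hA, hB]
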